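-- pv_equiv track=rewrite | github.com/kate-yq/NEU_CS5001 | lab/nov17lab.py | freq_sort
-- ===== SOURCE A (Python) =====
-- def freq_sort(str_list):
--     freq_map = {}
--     for element in str_list:
--         if freq_map.get(element)==None:
--             freq_map[element] = 1
--         else:
--             freq_map[element] = freq_map.get(element)+1
--     ans = []
--     for i in sorted(freq_map.items(), key=lambda freq: freq[1], reverse=True):
--         ans.append(i[0])
--     return ans
-- ===== SOURCE B (Python) =====
-- def freq_sort(str_list):
--     counts = {}
--     for s in str_list:
--         counts[s] = counts.get(s, 0) + 1
--     if not counts: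
--         return []
--     m = max(counts.values())
--     buckets = {}
--     for s, c in counts.items():
--         buckets.setdefault(c, []).append(s)
--     ans = []
--     for c in range(m, 0, -1):
--         ans += buckets.get(c, [])
--     return ans
-- ===== Notes on version B (the rewrite author's own statement) =====
-- stated objective: alternative
-- what changed: Replaces the comparison sort of (string, count) items by a counting/bucket pass: distinct strings are appended to a bucket keyed by their count in insertion order, and buckets are concatenated from the maximum count down to 1, preserving A's stable descending-frequency order.
import Mathlib
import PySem

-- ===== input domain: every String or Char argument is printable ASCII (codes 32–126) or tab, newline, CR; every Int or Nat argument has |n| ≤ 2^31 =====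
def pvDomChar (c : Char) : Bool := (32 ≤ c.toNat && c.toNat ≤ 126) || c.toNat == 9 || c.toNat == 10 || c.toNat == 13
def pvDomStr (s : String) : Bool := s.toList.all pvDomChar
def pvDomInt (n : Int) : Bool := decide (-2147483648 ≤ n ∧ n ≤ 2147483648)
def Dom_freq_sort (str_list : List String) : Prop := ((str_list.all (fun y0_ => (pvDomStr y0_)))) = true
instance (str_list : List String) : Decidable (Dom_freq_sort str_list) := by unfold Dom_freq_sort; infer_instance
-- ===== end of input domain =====

-- B replaces A's comparison sort of the (string, count) items by a counting/bucket pass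
-- (buckets keyed by count, concatenated from the maximum count down to 1): an alternative algorithm.

-- ===== PORT A =====
def freq_sort (str_list : List String) : List String :=
  let freq_map := str_list.foldl
    (fun d element =>
      if d.get? element = none then d.insert element 1
      else d.insert element ((d.get? element).getD 0 + 1))
    (PySem.Dict.empty : PySem.Dict String Int)
  (PySem.List.sorted freq_map.items (fun freq => freq.2) true).foldl
    (fun ans i => ans ++ [i.1]) []

-- ===== PORT B =====
def freq_sort_alt (str_list : List String) : List String :=
  let counts := str_list.foldl
    (fun d s => d.insert s (d.getD s 0 + 1))
    (PySem.Dict.empty : PySem.Dict String Int)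
  match PySem.List.max? counts.values (fun v => v) with
  | none => []
  | some m =>
    let buckets := counts.items.foldl
      (fun d p => d.modify p.2 [] (fun l => l ++ [p.1]))
      (PySem.Dict.empty : PySem.Dict Int (List String))
    (PySem.List.pyRange m 0 (-1)).foldl (fun ans c => ans ++ buckets.getD c []) []

-- ===== PRECONDITION & SPEC =====
def Spec_freq_sort (str_list : List String) (out : List String) : Prop := out = freq_sort_alt str_list
instance (str_list : List String) (out : List String) : Decidable (Spec_freq_sort str_list out) := by unfold Spec_freq_sort; infer_instance

-- ===== CLAIM (what is proved, stated in full; the proofs are below) =====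
def Claim_equal_freq_sort : Prop := ∀ (str_list : List String), Dom_freq_sort str_list → Spec_freq_sort str_list (freq_sort str_list)

-- ===== LEMMAS AND PROOFS =====

-- A's counting step (get == None test) is the getD-based counting step
lemma a_fold_eq_counter (xs : List String) :
    xs.foldl
      (fun d element =>
        if d.get? element = none then d.insert element 1
        else d.insert element ((d.get? element).getD 0 + 1))
      (PySem.Dict.empty : PySem.Dict String Int) = PySem.Dict.counter xs := by
  rw [← PySem.Dict.foldl_insert_getD_add_one_eq_counter]
  have hfn : (fun (d : PySem.Dict String Int) element =>
      if d.get? element = none then d.insert element 1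
      else d.insert element ((d.get? element).getD 0 + 1)) =
      (fun d e => d.insert e (d.getD e 0 + 1)) := by
    funext d e
    cases h : d.get? e with
    | none => simp [PySem.Dict.getD_eq_get?_getD, h]
    | some v => simp [PySem.Dict.getD_eq_get?_getD, h]
  rw [hfn]

-- inserting an element all of whose comparisons hold goes to the front
lemma insertBy_of_forall_before {α : Type} (before : α → α → Bool) (x : α) (l : List α)
    (h : ∀ y ∈ l, before x y = true) :
    PySem.List.insertBy before x l = x :: l := by
  cases l with
  | nil => rfl
  | cons a t => simp [PySem.List.insertBy, h a (by simp)]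

-- insertion skips a prefix on which the comparison fails
lemma insertBy_append_left {α : Type} (before : α → α → Bool) (x : α) (l₁ l₂ : List α)
    (h : ∀ y ∈ l₁, before x y = false) :
    PySem.List.insertBy before x (l₁ ++ l₂) = l₁ ++ PySem.List.insertBy before x l₂ := by
  induction l₁ with
  | nil => rfl
  | cons a t ih =>
    simp only [List.cons_append, PySem.List.insertBy, h a (by simp)]
    simp only [Bool.false_eq_true, if_false]
    rw [ih (fun y hy => h y (by simp [hy]))]

-- inserting x into a bucket decomposition puts it at the end of its own bucket
lemma insertBy_flatMap_buckets {α : Type} (key : α → Int) (x : α) (cs : List Int) (g : Int → List α)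
    (hp : cs.Pairwise (· > ·)) (hg : ∀ c ∈ cs, ∀ y ∈ g c, key y = c) (hx : key x ∈ cs) :
    PySem.List.insertBy (fun a b => decide (key b < key a)) x (cs.flatMap g) =
      cs.flatMap (fun c => g c ++ if key x = c then [x] else []) := by
  induction cs with
  | nil => simp at hx
  | cons c cs' ih =>
    rcases List.pairwise_cons.mp hp with ⟨hcgt, hp'⟩
    by_cases hk : key x = c
    · -- x lands at the end of bucket c: bucket-c elements compare false, all later ones true
      have h1 : ∀ y ∈ g c, (fun a b => decide (key b < key a)) x y = false := by
        intro y hy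
        have := hg c (by simp) y hy
        simp [this, hk]
      rw [List.flatMap_cons, insertBy_append_left _ _ _ _ h1]
      have h2 : ∀ y ∈ cs'.flatMap g, (fun a b => decide (key b < key a)) x y = true := by
        intro y hy
        rcases List.mem_flatMap.mp hy with ⟨c', hc', hyc'⟩
        have := hg c' (by simp [hc']) y hyc'
        simp [this, hk]
        exact hcgt c' hc'
      rw [insertBy_of_forall_before _ _ _ h2]
      have h3 : cs'.flatMap g = cs'.flatMap (fun c' => g c' ++ if key x = c' then [x] else []) := by
        apply List.flatMap_congr
        intro c' hc'
        have hne : key x ≠ c' := by have := hcgt c' hc'; omega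
        simp [hne]
      rw [List.flatMap_cons, ← h3]
      simp [hk]
    · have hx' : key x ∈ cs' := by rcases List.mem_cons.mp hx with h | h; exact absurd h hk; exact h
      have hlt : key x < c := hcgt _ hx'
      have h1 : ∀ y ∈ g c, (fun a b => decide (key b < key a)) x y = false := by
        intro y hy
        have := hg c (by simp) y hy
        simp [this]; omega
      rw [List.flatMap_cons, insertBy_append_left _ _ _ _ h1,
        ih hp' (fun c' hc' => hg c' (by simp [hc'])) hx']
      simp [List.flatMap_cons, hk]
-- stable descending sort by an Int key is the concatenation of the key-buckets, highest key first
lemma sorted_rev_eq_flatMap_buckets {α : Type} (key : α → Int) (ys : List α) (cs : List Int)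
    (hp : cs.Pairwise (· > ·)) (hmem : ∀ y ∈ ys, key y ∈ cs) :
    PySem.List.sorted ys key true = cs.flatMap (fun c => ys.filter (fun y => key y == c)) := by
  induction ys using List.reverseRecOn with
  | nil => simp [PySem.List.sorted]
  | append_singleton ys x ih =>
    rw [PySem.List.sorted_rev_eq_foldl_insertBy, List.foldl_append]
    simp only [List.foldl_cons, List.foldl_nil]
    rw [← PySem.List.sorted_rev_eq_foldl_insertBy,
      ih (fun y hy => hmem y (by simp [hy])),
      insertBy_flatMap_buckets key x cs
        (fun c => ys.filter (fun y => key y == c)) hp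
        (fun c hc y hy => by simpa using (List.mem_filter.mp hy).2)
        (hmem x (by simp))]
    apply List.flatMap_congr
    intro c hc
    rw [List.filter_append]
    by_cases h : key x = c <;> simp [h]

-- the bucket dict built from the items lists, per count, the strings of that count in order
lemma bucket_getD (items : List (String × Int)) (c : Int) :
    (items.foldl (fun d p => d.modify p.2 [] (fun l => l ++ [p.1]))
      (PySem.Dict.empty : PySem.Dict Int (List String))).getD c [] =
      (items.filter (fun p => p.2 == c)).map (fun p => p.1) := by
  have hswap : items.foldl (fun d p => d.modify p.2 [] (fun l => l ++ [p.1]))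
      (PySem.Dict.empty : PySem.Dict Int (List String)) =
      (items.map Prod.swap).foldl (fun d q => d.modify q.1 [] (fun l => l ++ [q.2]))
        (PySem.Dict.empty : PySem.Dict Int (List String)) := by
    rw [List.foldl_map]
    simp
  rw [hswap, PySem.Dict.getD_foldl_modify_append, PySem.Dict.getD_empty]
  simp [List.filter_map, List.map_map, Function.comp_def]

theorem freq_sort_spec : Claim_equal_freq_sort := by
  intro xs _
  unfold Spec_freq_sort freq_sort freq_sort_alt
  simp only [a_fold_eq_counter, PySem.Dict.foldl_insert_getD_add_one_eq_counter]
  cases hm : PySem.List.max? (PySem.Dict.counter xs).values (fun v => v) with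
  | none =>
    -- no values: the dict is empty, A's sorted loop produces [] too
    have hv : (PySem.Dict.counter xs).values = [] := (PySem.List.max?_eq_none_iff _ _).mp hm
    have hitems : (PySem.Dict.counter xs).items = [] := by
      have := hv
      simp only [PySem.Dict.values] at this
      exact List.map_eq_nil_iff.mp this
    simp [hitems, PySem.List.sorted]
  | some m =>
    dsimp only
    have hp : (PySem.List.pyRange m 0 (-1)).Pairwise (· > ·) := by
      rw [PySem.List.pyRange_neg_one_eq_reverse, List.pairwise_reverse]
      exact PySem.List.pairwise_lt_pyRange_one _ _
    have hmem : ∀ p ∈ (PySem.Dict.counter xs).items, p.2 ∈ PySem.List.pyRange m 0 (-1) := by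
      intro p hpi
      rw [PySem.List.mem_pyRange_neg_one]
      constructor
      · rw [PySem.Dict.items_counter] at hpi
        rcases List.mem_map.mp hpi with ⟨k, hk, hkp⟩
        have : k ∈ xs := (PySem.Set.mem_ofList _ _).mp hk
        have hc : 0 < xs.count k := List.count_pos_iff.mpr this
        rw [← hkp]
        simpa using hc
      · have hval : p.2 ∈ (PySem.Dict.counter xs).values := by
          simp only [PySem.Dict.values]
          exact List.mem_map.mpr ⟨p, hpi, rfl⟩
        exact PySem.List.max?_isMax hm _ hval
    rw [PySem.List.foldl_append_singleton_eq_map, PySem.List.foldl_append_eq_flatMap,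
      sorted_rev_eq_flatMap_buckets (fun p : String × Int => p.2) ((PySem.Dict.counter xs).items) (PySem.List.pyRange m 0 (-1)) hp hmem,
      List.nil_append, List.nil_append, List.map_flatMap]
    apply List.flatMap_congr
    intro c _
    rw [bucket_getD]
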